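-- pv_equiv track=rewrite | github.com/SumarokovDaniil/task_easy_list_v1 | ft_rev_par_list.py | ft_rev_par_list
-- ===== SOURCE A (Python) =====
-- def ft_rev_list(mass):
--     new_mass = []
--     for i in range(-1, -len(mass) - 1, -1):
--         new_mass.append(mass[i])
--     return new_mass
--
-- def ft_rev_par_list(mass):
--     new_mass = list()
--
--     if len(mass) % 2 == 0:
--         for i in range(1, len(mass), 2):
--             new_mass.append(mass[i])
--             new_mass.append(mass[i - 1])
--         return ft_rev_list(new_mass)
--
--     for i in range(1, len(mass), 2):
--         new_mass.append(mass[i])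
--         new_mass.append(mass[i - 1])
--     new_mass.append(mass[-1])
--     return ft_rev_list(new_mass)
-- ===== SOURCE B (Python) =====
-- def ft_rev_par_list(mass):
--     res = []
--     n = len(mass)
--     if n % 2 == 1:
--         res.append(mass[-1])
--         start = n - 3
--     else:
--         start = n - 2
--     for i in range(start, -1, -2):
--         res.append(mass[i])
--         res.append(mass[i + 1])
--     return res
-- ===== Notes on version B (the rewrite author's own statement) =====
-- stated objective: simpler
-- what changed: B builds the answer directly in one backward pass over pair-start indices (placing the lone odd element first), instead of A's forward pair-swapping pass followed by a separate hand-written element-by-element reversal helper.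
import Mathlib
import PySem

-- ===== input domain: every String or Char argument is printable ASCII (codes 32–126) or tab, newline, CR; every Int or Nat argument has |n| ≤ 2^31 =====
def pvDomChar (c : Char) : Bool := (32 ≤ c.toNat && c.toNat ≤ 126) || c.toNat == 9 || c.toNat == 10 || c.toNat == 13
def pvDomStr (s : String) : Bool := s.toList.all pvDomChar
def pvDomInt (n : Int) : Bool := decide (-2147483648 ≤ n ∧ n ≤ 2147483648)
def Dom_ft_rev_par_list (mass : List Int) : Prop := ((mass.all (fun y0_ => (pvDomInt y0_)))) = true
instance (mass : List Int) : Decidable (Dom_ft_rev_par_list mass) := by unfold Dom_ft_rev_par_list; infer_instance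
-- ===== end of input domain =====

-- B builds the result directly in one backward pass instead of A's swap-then-reverse-via-helper; same O(n) cost, simpler shape.

-- ===== PORT A =====
def ft_rev_list (mass : List Int) : List Int :=
  (PySem.List.pyRange (-1) (-(mass.length : Int) - 1) (-1)).foldl
    (fun acc i => acc ++ [PySem.List.pyGetD mass i 0]) []

def ft_rev_par_list (mass : List Int) : List Int :=
  if PySem.Int.mod (mass.length : Int) 2 == 0 then
    ft_rev_list ((PySem.List.pyRange 1 (mass.length : Int) 2).foldl
      (fun acc i => acc ++ [PySem.List.pyGetD mass i 0, PySem.List.pyGetD mass (i - 1) 0]) [])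
  else
    ft_rev_list (((PySem.List.pyRange 1 (mass.length : Int) 2).foldl
      (fun acc i => acc ++ [PySem.List.pyGetD mass i 0, PySem.List.pyGetD mass (i - 1) 0]) [])
      ++ [PySem.List.pyGetD mass (-1) 0])

-- ===== PORT B =====
def ft_rev_par_list_alt (mass : List Int) : List Int :=
  let n : Int := (mass.length : Int)
  let res : List Int := if PySem.Int.mod n 2 == 1 then [PySem.List.pyGetD mass (-1) 0] else []
  let start : Int := if PySem.Int.mod n 2 == 1 then n - 3 else n - 2
  (PySem.List.pyRange start (-1) (-2)).foldl
    (fun acc i => acc ++ [PySem.List.pyGetD mass i 0, PySem.List.pyGetD mass (i + 1) 0]) res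

-- ===== PRECONDITION & SPEC =====
def Spec_ft_rev_par_list (mass : List Int) (out : List Int) : Prop := out = ft_rev_par_list_alt mass
instance (mass : List Int) (out : List Int) : Decidable (Spec_ft_rev_par_list mass out) := by unfold Spec_ft_rev_par_list; infer_instance

-- ===== CLAIM (what is proved, stated in full; the proofs are below) =====
def Claim_equal_ft_rev_par_list : Prop := ∀ (mass : List Int), Dom_ft_rev_par_list mass → Spec_ft_rev_par_list mass (ft_rev_par_list mass)

-- ===== LEMMAS AND PROOFS =====

-- A's hand-written reversal helper is List.reverse.
theorem ft_rev_list_eq_reverse (xs : List Int) : ft_rev_list xs = xs.reverse := by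
  unfold ft_rev_list
  rw [PySem.List.foldl_append_singleton_eq_map, PySem.List.pyRange_neg_one, List.map_map]
  have hn : (-1 - (-(xs.length : Int) - 1)).toNat = xs.length := by omega
  rw [hn]
  apply List.ext_getElem
  · simp
  · intro i h1 h2
    simp only [List.nil_append, List.getElem_map, List.getElem_range, Function.comp_apply,
      List.getElem_reverse]
    have hlen : i < xs.length := by simpa using h2
    have hidx : (-1 - (i : Int)) = -((i + 1 : Nat) : Int) := by push_cast; ring
    rw [hidx, PySem.List.pyGetD_neg_natCast xs (i + 1) 0 (by omega) (by omega)]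
    congr 1
    omega

-- range(1, n, 2) as a map over a Nat range of length n/2
theorem pyRange_two (n : Nat) :
    PySem.List.pyRange 1 (n : Int) 2
      = (List.range (n / 2)).map (fun k : Nat => (1 : Int) + 2 * (k : Int)) := by
  have hc : (if (1 : Int) < (n : Int) then (((n : Int) - 1 + 2 - 1) / 2).toNat else 0) = n / 2 := by
    split <;> omega
  rw [PySem.List.pyRange_of_pos 1 (n : Int) (by norm_num), hc]

-- range(a, -1, -2) as a map over a Nat range
theorem pyRange_negtwo (a : Int) :
    PySem.List.pyRange a (-1) (-2)
      = (List.range ((a + 2) / 2).toNat).map (fun k : Nat => a + (-2) * (k : Int)) := by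
  have hc : (if (-1 : Int) < a then ((a - -1 + - -2 - 1) / - -2).toNat else 0)
      = ((a + 2) / 2).toNat := by
    norm_num
    split <;> omega
  unfold PySem.List.pyRange
  rw [if_neg (by norm_num : ¬((-2 : Int) = 0)), if_neg (by norm_num : ¬((0 : Int) < -2)), hc]

theorem flatMap_pairs_congr (f g f' g' : Nat → Int) (m : Nat)
    (h : ∀ k, k < m → f k = f' k ∧ g k = g' k) :
    (List.range m).flatMap (fun k => [f k, g k]) = (List.range m).flatMap (fun k => [f' k, g' k]) := by
  rw [List.flatMap_def, List.flatMap_def]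
  congr 1
  apply List.map_congr_left
  intro k hk
  rw [List.mem_range] at hk
  rcases h k hk with ⟨h1, h2⟩
  rw [h1, h2]

-- reversing a flatMap of 2-element blocks over a Nat range
theorem rev_flatMap_pairs (f g : Nat → Int) (m : Nat) :
    ((List.range m).flatMap (fun k => [f k, g k])).reverse
      = (List.range m).flatMap (fun k => [g (m - 1 - k), f (m - 1 - k)]) := by
  induction m with
  | zero => simp
  | succ m ih =>
    conv_lhs => rw [List.range_succ]
    conv_rhs => rw [List.range_succ_eq_map]
    simp only [List.flatMap_append, List.flatMap_cons, List.flatMap_nil, List.reverse_append,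
      List.flatMap_map]
    rw [ih]
    simp only [Nat.add_sub_cancel, List.reverse_cons, List.reverse_nil]
    have hcg : ((List.range m).flatMap fun k => [g (m - 1 - k), f (m - 1 - k)])
        = (List.range m).flatMap fun k => [g (m + 1 - 1 - Nat.succ k), f (m + 1 - 1 - Nat.succ k)] :=
      flatMap_pairs_congr _ _ _ _ m (by intro k hk; constructor <;> (congr 1; omega))
    rw [hcg]
    simp

-- ===== VERDICT (by name: the statement is the Claim_ definition above) =====
theorem ft_rev_par_list_spec : Claim_equal_ft_rev_par_list := by
  intro mass _
  show ft_rev_par_list mass = ft_rev_par_list_alt mass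
  have hmod : PySem.Int.mod ((mass.length : Nat) : Int) 2 = ((mass.length : Nat) : Int) % 2 :=
    PySem.Int.mod_eq_emod_of_pos (by norm_num)
  by_cases hpar : mass.length % 2 = 0
  · have h0 : (PySem.Int.mod ((mass.length : Nat) : Int) 2 == 0) = true := by
      rw [hmod]; simp; omega
    have h1 : (PySem.Int.mod ((mass.length : Nat) : Int) 2 == 1) = false := by
      rw [hmod]; simp; omega
    unfold ft_rev_par_list ft_rev_par_list_alt
    simp only [h0, h1, if_true, if_false, Bool.false_eq_true]
    rw [ft_rev_list_eq_reverse, PySem.List.foldl_append_eq_flatMap,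
      PySem.List.foldl_append_eq_flatMap, pyRange_two, pyRange_negtwo, List.flatMap_map,
      List.flatMap_map, List.nil_append, List.nil_append]
    have hcnt : (((mass.length : Int) - 2 + 2) / 2).toNat = mass.length / 2 := by omega
    rw [hcnt, rev_flatMap_pairs]
    apply flatMap_pairs_congr
    intro k hk
    constructor <;> (congr 1; omega)
  · have h0 : (PySem.Int.mod ((mass.length : Nat) : Int) 2 == 0) = false := by
      rw [hmod]; simp; omega
    have h1 : (PySem.Int.mod ((mass.length : Nat) : Int) 2 == 1) = true := by
      rw [hmod]; simp; omega
    unfold ft_rev_par_list ft_rev_par_list_alt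
    simp only [h0, h1, if_true, if_false, Bool.false_eq_true]
    rw [ft_rev_list_eq_reverse, PySem.List.foldl_append_eq_flatMap,
      PySem.List.foldl_append_eq_flatMap, pyRange_two, pyRange_negtwo, List.flatMap_map,
      List.flatMap_map, List.nil_append, List.reverse_append]
    have hcnt : (((mass.length : Int) - 3 + 2) / 2).toNat = mass.length / 2 := by omega
    rw [hcnt, rev_flatMap_pairs]
    simp only [List.reverse_cons, List.reverse_nil, List.nil_append, List.cons_append]
    congr 1
    apply flatMap_pairs_congr
    intro k hk
    constructor <;> (congr 1; omega)
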